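-- pv_equiv track=rewrite | github.com/MrBrantCode/unitest_baseline | mut_generate/mist_train_cf/cf_78577/solution.py | find_min_max_magnitude
-- ===== SOURCE A (Python) =====
-- def find_min_max_magnitude(array):
--     min_magnitude_numbers = []
--     max_magnitude_numbers = []
--     min_magnitude = float('inf')
--     max_magnitude = float('-inf')
--
--     for number in array:
--         magnitude = abs(number)
--
--         if magnitude < min_magnitude:
--             min_magnitude = magnitude
--             min_magnitude_numbers = [number]
--         elif magnitude == min_magnitude:
--             min_magnitude_numbers.append(number)
--
--         if magnitude > max_magnitude:
--             max_magnitude = magnitude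
--             max_magnitude_numbers = [number]
--         elif magnitude == max_magnitude:
--             max_magnitude_numbers.append(number)
--
--     return min_magnitude_numbers, max_magnitude_numbers
-- ===== SOURCE B (Python) =====
-- def find_min_max_magnitude(array):
--     if not array:
--         return [], []
--     min_mag = min(abs(x) for x in array)
--     max_mag = max(abs(x) for x in array)
--     return ([x for x in array if abs(x) == min_mag],
--             [x for x in array if abs(x) == max_mag])
-- ===== Notes on version B (the rewrite author's own statement) =====
-- stated objective: simpler
-- what changed: Replaced A's single fused loop maintaining four pieces of accumulator state (two lists and two running magnitudes with float sentinels) by an aggregate-then-filter decomposition: compute min and max absolute value, then filter the list for each.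
import Mathlib
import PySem

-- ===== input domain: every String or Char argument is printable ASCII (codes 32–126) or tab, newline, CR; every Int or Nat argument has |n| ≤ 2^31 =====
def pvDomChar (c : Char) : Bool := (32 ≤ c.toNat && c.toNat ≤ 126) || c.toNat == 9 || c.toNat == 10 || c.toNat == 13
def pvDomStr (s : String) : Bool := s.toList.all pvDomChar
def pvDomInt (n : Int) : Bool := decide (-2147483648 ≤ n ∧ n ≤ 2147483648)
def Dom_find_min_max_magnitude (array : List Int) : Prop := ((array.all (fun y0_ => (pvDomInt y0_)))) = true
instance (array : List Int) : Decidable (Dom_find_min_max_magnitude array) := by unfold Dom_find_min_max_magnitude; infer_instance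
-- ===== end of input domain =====

-- B replaces A's fused four-piece-accumulator loop by aggregate-then-filter (simpler decomposition, same O(n) cost).

-- ===== PORT A =====
-- A's loop, step for step.  `none` for min_magnitude/max_magnitude plays float('inf')/float('-inf'):
-- for Int magnitudes, `mag < inf` is always true and `mag == inf` never holds, so Option Int is exact here.
def pvGoA : List Int → List Int × List Int × Option Int × Option Int → List Int × List Int
  | [], (mins, maxs, _, _) => (mins, maxs)
  | n :: rest, (mins, maxs, mn, mx) =>
    let mag := |n|
    let (mins', mn') :=
      match mn with
      | none => ([n], some mag)          -- mag < inf
      | some m =>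
        if mag < m then ([n], some mag)
        else if mag = m then (mins ++ [n], some m)
        else (mins, some m)
    let (maxs', mx') :=
      match mx with
      | none => ([n], some mag)          -- mag > -inf
      | some m =>
        if mag > m then ([n], some mag)
        else if mag = m then (maxs ++ [n], some m)
        else (maxs, some m)
    pvGoA rest (mins', maxs', mn', mx')

def find_min_max_magnitude (array : List Int) : List Int × List Int :=
  pvGoA array ([], [], none, none)

-- ===== PORT B =====
def find_min_max_magnitude_alt (array : List Int) : List Int × List Int :=
  match array with
  | [] => ([], [])
  | x :: xs =>
    let min_mag := xs.foldl (fun a b => min a |b|) |x|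
    let max_mag := xs.foldl (fun a b => max a |b|) |x|
    ((x :: xs).filter (fun y => |y| == min_mag),
     (x :: xs).filter (fun y => |y| == max_mag))

-- ===== PRECONDITION & SPEC =====
def Spec_find_min_max_magnitude (array : List Int) (out : List Int × List Int) : Prop := out = find_min_max_magnitude_alt array
instance (array : List Int) (out : List Int × List Int) : Decidable (Spec_find_min_max_magnitude array out) := by unfold Spec_find_min_max_magnitude; infer_instance

-- ===== CLAIM (what is proved, stated in full; the proofs are below) =====
def Claim_equal_find_min_max_magnitude : Prop := ∀ (array : List Int), Dom_find_min_max_magnitude array → Spec_find_min_max_magnitude array (find_min_max_magnitude array)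

-- ===== LEMMAS AND PROOFS =====

-- the min- and max-halves of A's loop, separated
def pvGoMin : List Int → List Int → Int → List Int
  | [], mins, _ => mins
  | n :: rest, mins, m =>
    if |n| < m then pvGoMin rest [n] |n|
    else if |n| = m then pvGoMin rest (mins ++ [n]) m
    else pvGoMin rest mins m

def pvGoMax : List Int → List Int → Int → List Int
  | [], maxs, _ => maxs
  | n :: rest, maxs, m =>
    if |n| > m then pvGoMax rest [n] |n|
    else if |n| = m then pvGoMax rest (maxs ++ [n]) m
    else pvGoMax rest maxs m

theorem pvGoA_split (xs : List Int) : ∀ (mins maxs : List Int) (m M : Int),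
    pvGoA xs (mins, maxs, some m, some M) = (pvGoMin xs mins m, pvGoMax xs maxs M) := by
  induction xs with
  | nil => intros; rfl
  | cons n rest ih =>
    intro mins maxs m M
    have step : pvGoA (n :: rest) (mins, maxs, some m, some M) =
        pvGoA rest ((if |n| < m then [n] else if |n| = m then mins ++ [n] else mins),
                    (if |n| > M then [n] else if |n| = M then maxs ++ [n] else maxs),
                    some (if |n| < m then |n| else m),
                    some (if |n| > M then |n| else M)) := by
      simp only [pvGoA]
      split_ifs <;> rfl
    rw [step, ih]
    simp only [pvGoMin, pvGoMax]
    split_ifs <;> rfl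

theorem pvFoldMin_le (xs : List Int) : ∀ m : Int, xs.foldl (fun a b => min a |b|) m ≤ m := by
  induction xs with
  | nil => intro m; simp
  | cons n rest ih =>
    intro m
    simp only [List.foldl]
    exact le_trans (ih _) (min_le_left _ _)

theorem pvFoldMax_ge (xs : List Int) : ∀ m : Int, m ≤ xs.foldl (fun a b => max a |b|) m := by
  induction xs with
  | nil => intro m; simp
  | cons n rest ih =>
    intro m
    simp only [List.foldl]
    exact le_trans (le_max_left _ _) (ih _)

theorem pvGoMin_eq (xs : List Int) : ∀ (mins : List Int) (m : Int),
    pvGoMin xs mins m =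
      if xs.foldl (fun a b => min a |b|) m < m
      then xs.filter (fun y => |y| == xs.foldl (fun a b => min a |b|) m)
      else mins ++ xs.filter (fun y => |y| == m) := by
  induction xs with
  | nil => intro mins m; simp [pvGoMin]
  | cons n rest ih =>
    intro mins m
    have hle := pvFoldMin_le rest (min m |n|)
    simp only [pvGoMin, List.foldl, List.filter]
    by_cases h1 : |n| < m
    · have hmn : min m |n| = |n| := by omega
      rw [hmn] at hle ⊢
      rw [ih [n] |n|]
      have hfle := pvFoldMin_le rest |n|
      by_cases h2 : rest.foldl (fun a b => min a |b|) |n| < |n|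
      · simp only [if_pos h1, if_pos h2, if_pos (by omega : rest.foldl (fun a b => min a |b|) |n| < m)]
        have : (|n| == rest.foldl (fun a b => min a |b|) |n|) = false := by
          simp; omega
        simp [this]
      · have heq : rest.foldl (fun a b => min a |b|) |n| = |n| := by omega
        simp only [if_pos h1, if_neg h2, if_pos (by omega : rest.foldl (fun a b => min a |b|) |n| < m)]
        rw [heq]
        simp
    · by_cases h2 : |n| = m
      · have hmn : min m |n| = m := by omega
        rw [hmn] at hle ⊢
        rw [if_neg (by omega : ¬ |n| < m), if_pos h2, ih (mins ++ [n]) m]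
        by_cases h3 : rest.foldl (fun a b => min a |b|) m < m
        · simp only [if_pos h3]
          have : (|n| == rest.foldl (fun a b => min a |b|) m) = false := by
            simp; omega
          simp [this]
        · simp only [if_neg h3]
          have : (|n| == m) = true := by simp [h2]
          simp [this]
      · have hmn : min m |n| = m := by omega
        rw [hmn] at hle ⊢
        rw [if_neg (by omega : ¬ |n| < m), if_neg h2, ih mins m]
        have hne : (|n| == m) = false := by simp [h2]
        by_cases h3 : rest.foldl (fun a b => min a |b|) m < m
        · simp only [if_pos h3]
          have : (|n| == rest.foldl (fun a b => min a |b|) m) = false := by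
            simp; omega
          simp [this]
        · simp [h3, hne]

theorem pvGoMax_eq (xs : List Int) : ∀ (maxs : List Int) (m : Int),
    pvGoMax xs maxs m =
      if m < xs.foldl (fun a b => max a |b|) m
      then xs.filter (fun y => |y| == xs.foldl (fun a b => max a |b|) m)
      else maxs ++ xs.filter (fun y => |y| == m) := by
  induction xs with
  | nil => intro maxs m; simp [pvGoMax]
  | cons n rest ih =>
    intro maxs m
    have hge := pvFoldMax_ge rest (max m |n|)
    simp only [pvGoMax, List.foldl, List.filter]
    by_cases h1 : |n| > m
    · have hmn : max m |n| = |n| := by omega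
      rw [hmn] at hge ⊢
      rw [if_pos h1, ih [n] |n|]
      have hfge := pvFoldMax_ge rest |n|
      by_cases h2 : |n| < rest.foldl (fun a b => max a |b|) |n|
      · simp only [if_pos h2, if_pos (by omega : m < rest.foldl (fun a b => max a |b|) |n|)]
        have : (|n| == rest.foldl (fun a b => max a |b|) |n|) = false := by
          simp; omega
        simp [this]
      · have heq : rest.foldl (fun a b => max a |b|) |n| = |n| := by omega
        simp only [if_neg h2, if_pos (by omega : m < rest.foldl (fun a b => max a |b|) |n|)]
        rw [heq]
        simp
    · by_cases h2 : |n| = m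
      · have hmn : max m |n| = m := by omega
        rw [hmn] at hge ⊢
        rw [if_neg (by omega : ¬ |n| > m), if_pos h2, ih (maxs ++ [n]) m]
        by_cases h3 : m < rest.foldl (fun a b => max a |b|) m
        · simp only [if_pos h3]
          have : (|n| == rest.foldl (fun a b => max a |b|) m) = false := by
            simp; omega
          simp [this]
        · simp only [if_neg h3]
          have : (|n| == m) = true := by simp [h2]
          simp [this]
      · have hmn : max m |n| = m := by omega
        rw [hmn] at hge ⊢
        rw [if_neg (by omega : ¬ |n| > m), if_neg h2, ih maxs m]
        have hne : (|n| == m) = false := by simp [h2]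
        by_cases h3 : m < rest.foldl (fun a b => max a |b|) m
        · simp only [if_pos h3]
          have : (|n| == rest.foldl (fun a b => max a |b|) m) = false := by
            simp; omega
          simp [this]
        · simp [h3, hne]

-- ===== VERDICT (by name: the statement is the Claim_ definition above) =====
theorem find_min_max_magnitude_spec : Claim_equal_find_min_max_magnitude := by
  intro array _
  unfold Spec_find_min_max_magnitude
  cases array with
  | nil => rfl
  | cons x xs =>
    show pvGoA (x :: xs) ([], [], none, none) = _
    have h1 : pvGoA (x :: xs) ([], [], none, none) = pvGoA xs ([x], [x], some |x|, some |x|) := rfl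
    rw [h1, pvGoA_split, pvGoMin_eq, pvGoMax_eq]
    simp only [find_min_max_magnitude_alt]
    have hle := pvFoldMin_le xs |x|
    have hge := pvFoldMax_ge xs |x|
    simp only [Prod.mk.injEq]
    constructor
    · by_cases h : xs.foldl (fun a b => min a |b|) |x| < |x|
      · have : (|x| == xs.foldl (fun a b => min a |b|) |x|) = false := by simp; omega
        simp [h, List.filter, this]
      · have heq : xs.foldl (fun a b => min a |b|) |x| = |x| := by omega
        simp [heq, List.filter]
    · by_cases h : |x| < xs.foldl (fun a b => max a |b|) |x|
      · have : (|x| == xs.foldl (fun a b => max a |b|) |x|) = false := by simp; omega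
        simp [h, List.filter, this]
      · have heq : xs.foldl (fun a b => max a |b|) |x| = |x| := by omega
        simp [heq, List.filter]
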